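-- pv_equiv track=rewrite | github.com/rjoshi47/DSmax | cookOff/arrays/rankInOn.py | getMedianIndex
-- ===== SOURCE A (Python) =====
-- def getMedianIndex(arr):
--     al = len(arr)
--     idx = int(al/2)
--     if al % 2 != 0:
--         idx = idx + 1
--     visited = [0]*len(arr)
--     for i in range(0, idx):
--         minIdx = -1
--         for j in range(0, al):
--             if visited[j] == 0 and minIdx == -1:
--                 minIdx = j
--             if visited[j] == 0 and arr[j] < arr[minIdx]:
--                 minIdx = j
--         visited[minIdx] = 1
--     return minIdx
-- ===== SOURCE B (Python) =====
-- def getMedianIndex(arr):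
--     idx = (len(arr) + 1) // 2
--     order = sorted(range(len(arr)), key=lambda j: arr[j])
--     return order[idx - 1]
-- ===== Notes on version B (the rewrite author's own statement) =====
-- stated objective: faster
-- what changed: Replaces the quadratic repeated unvisited-min scan with one stable sort of the indices by value and a single lookup of the (ceil(n/2))-th index; Pre_ excludes only the empty list, on which A raises UnboundLocalError (B raises IndexError).
import Mathlib
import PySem

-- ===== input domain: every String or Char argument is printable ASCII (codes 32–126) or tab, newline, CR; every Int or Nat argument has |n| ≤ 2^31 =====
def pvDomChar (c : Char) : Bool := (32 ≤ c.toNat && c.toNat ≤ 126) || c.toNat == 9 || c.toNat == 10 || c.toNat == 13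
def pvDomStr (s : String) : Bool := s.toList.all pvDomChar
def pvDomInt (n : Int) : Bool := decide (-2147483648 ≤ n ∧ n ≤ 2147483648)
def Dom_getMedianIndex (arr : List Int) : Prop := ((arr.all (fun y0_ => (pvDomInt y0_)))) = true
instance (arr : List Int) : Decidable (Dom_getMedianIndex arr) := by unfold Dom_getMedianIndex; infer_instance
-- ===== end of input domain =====

-- B replaces A's repeated unvisited-minimum scan by one stable sort of the indices by value
-- and a single lookup (objective: faster; a timing run measures the difference).

-- ===== PORT A =====
-- A's inner 'for j in range(0, al)' scan; arr/visited accesses are via pyGetD: for 0 ≤ j < al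
-- they are in range, and pyGetD arr m1 0 with m1 = -1 (Python's arr[-1] wrap) is only reached
-- where the conjunct before it already decides the condition, mirroring Python's
-- short-circuit 'and'.
def pvInner (arr visited : List Int) (al : Int) : Int :=
  (PySem.List.pyRange 0 al 1).foldl (fun minIdx j =>
    let m1 := if PySem.List.pyGetD visited j 0 = 0 ∧ minIdx = -1 then j else minIdx
    if PySem.List.pyGetD visited j 0 = 0 ∧
        PySem.List.pyGetD arr j 0 < PySem.List.pyGetD arr m1 0 then j else m1) (-1)

-- Port of A. On arr = [] Python's A raises UnboundLocalError (minIdx is never assigned); the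
-- initial -1 here is an arbitrary total stand-in, and Pre_ excludes that input.
def getMedianIndex (arr : List Int) : Int :=
  let al : Int := arr.length
  let idx0 := PySem.Int.floordiv al 2   -- int(al/2) = al // 2 for any list length
  let idx := if PySem.Int.mod al 2 ≠ 0 then idx0 + 1 else idx0
  let res := (PySem.List.pyRange 0 idx 1).foldl (fun (st : List Int × Int) _ =>
      let minIdx := pvInner arr st.1 al
      (PySem.List.pySetD st.1 minIdx 1, minIdx)) (List.replicate arr.length 0, -1)
  res.2

-- ===== PORT B =====
-- Port of B: sorted(range(len(arr)), key=lambda j: arr[j]) then order[idx - 1].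
-- arr[j] is in range for every j produced by range(len(arr)); order[idx - 1] is in range for
-- arr ≠ [] (on [] Python's B raises IndexError, excluded by Pre_).
def getMedianIndex_alt (arr : List Int) : Int :=
  let idx : Int := PySem.Int.floordiv ((arr.length : Int) + 1) 2
  let order := PySem.List.sorted (PySem.List.pyRange 0 arr.length 1)
      (fun j => PySem.List.pyGetD arr j 0) false
  PySem.List.pyGetD order (idx - 1) 0

-- ===== PRECONDITION & SPEC =====
-- Pre_ excludes only the empty list: there A raises UnboundLocalError (and B IndexError).
def Pre_getMedianIndex (arr : List Int) : Prop := arr ≠ []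
instance (arr : List Int) : Decidable (Pre_getMedianIndex arr) := by
  unfold Pre_getMedianIndex; infer_instance

def pvWitness_getMedianIndex : List Int := [3, 1, 2]

def Spec_getMedianIndex (arr : List Int) (out : Int) : Prop := out = getMedianIndex_alt arr
instance (arr : List Int) (out : Int) : Decidable (Spec_getMedianIndex arr out) := by
  unfold Spec_getMedianIndex; infer_instance

-- ===== CLAIM (what is proved, stated in full; the proofs are below) =====
def Claim_equal_getMedianIndex : Prop := ∀ (arr : List Int), Dom_getMedianIndex arr →
  Pre_getMedianIndex arr → Spec_getMedianIndex arr (getMedianIndex arr)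

-- ===== LEMMAS AND PROOFS =====

-- The key A compares and B sorts by, and the strict (value, index) lexicographic order both
-- algorithms select by (A's strict-< scan breaks value ties by first = smallest index).
def pvKey (arr : List Int) (j : Int) : Int := PySem.List.pyGetD arr j 0
def pvLex (arr : List Int) (a b : Int) : Prop :=
  pvKey arr a < pvKey arr b ∨ (pvKey arr a = pvKey arr b ∧ a < b)

-- visited as maintained by A once the indices in `taken` have been selected
def pvVis (n : Nat) (taken : List Int) : List Int :=
  (List.range n).map (fun (j : Nat) => if (j : Int) ∈ taken then (1 : Int) else 0)

-- A's inner scan truncated to the first t loop iterations (pvInner = pvInnerUpTo at t = al)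
def pvInnerUpTo (arr visited : List Int) (t : Int) : Int :=
  (PySem.List.pyRange 0 t 1).foldl (fun minIdx j =>
    let m1 := if PySem.List.pyGetD visited j 0 = 0 ∧ minIdx = -1 then j else minIdx
    if PySem.List.pyGetD visited j 0 = 0 ∧
        PySem.List.pyGetD arr j 0 < PySem.List.pyGetD arr m1 0 then j else m1) (-1)

-- B's sorted index list
def pvOrder (arr : List Int) : List Int :=
  PySem.List.sorted (PySem.List.pyRange 0 arr.length 1)
    (fun j => PySem.List.pyGetD arr j 0) false

theorem pvVis_get (n : Nat) (taken : List Int) (j : Int) (h0 : 0 ≤ j) (h : j < n) :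
    PySem.List.pyGetD (pvVis n taken) j 0 = if j ∈ taken then 1 else 0 := by
  rw [PySem.List.pyGetD_of_nonneg _ _ h0]
  unfold pvVis
  rw [PySem.List.getD_map_range _ _ _ _ (by omega), Int.toNat_of_nonneg h0]

-- stability: inserting x (larger as an index than everything present) into a lex-sorted list
theorem pvInsertBy_pairwise (arr : List Int) (x : Int) (ys : List Int)
    (hys : ys.Pairwise (pvLex arr))
    (hlt : ∀ y ∈ ys, y < x) :
    (PySem.List.insertBy (fun a b => decide (pvKey arr a < pvKey arr b)) x ys).Pairwise
      (pvLex arr) := by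
  induction ys with
  | nil => simp [PySem.List.insertBy]
  | cons y ys ih =>
    rw [List.pairwise_cons] at hys
    obtain ⟨hy, hys'⟩ := hys
    by_cases hb : pvKey arr x < pvKey arr y
    · rw [show PySem.List.insertBy (fun a b => decide (pvKey arr a < pvKey arr b)) x (y :: ys)
          = x :: y :: ys by simp [PySem.List.insertBy, hb]]
      refine List.pairwise_cons.mpr ⟨?_, List.pairwise_cons.mpr ⟨hy, hys'⟩⟩
      intro z hz
      rcases List.mem_cons.mp hz with h1 | h1
      · subst h1; exact Or.inl hb
      · have := hy z h1
        unfold pvLex at *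
        omega
    · rw [show PySem.List.insertBy (fun a b => decide (pvKey arr a < pvKey arr b)) x (y :: ys)
          = y :: PySem.List.insertBy (fun a b => decide (pvKey arr a < pvKey arr b)) x ys by
          simp [PySem.List.insertBy, hb]]
      refine List.pairwise_cons.mpr ⟨?_, ih hys' (fun z hz => hlt z (by simp [hz]))⟩
      intro z hz
      rcases (PySem.List.mem_insertBy _ _ _ _).mp hz with h1 | h1
      · subst h1
        have hyx : y < z := hlt y (by simp)
        unfold pvLex at *
        omega
      · exact hy z h1

theorem pvFoldl_insertBy_pairwise (arr : List Int) :
    ∀ (xs acc : List Int), acc.Pairwise (pvLex arr) →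
    (∀ a ∈ acc, ∀ x ∈ xs, a < x) → xs.Pairwise (· < ·) →
    (xs.foldl (fun acc x =>
        PySem.List.insertBy (fun a b => decide (pvKey arr a < pvKey arr b)) x acc)
      acc).Pairwise (pvLex arr) := by
  intro xs
  induction xs with
  | nil => intro acc h _ _; simpa using h
  | cons x xs ih =>
    intro acc hacc hcross hxs
    rw [List.pairwise_cons] at hxs
    obtain ⟨hx, hxs'⟩ := hxs
    rw [List.foldl_cons]
    apply ih
    · exact pvInsertBy_pairwise arr x acc hacc (fun a ha => hcross a ha x (by simp))
    · intro a ha x' hx'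
      rcases (PySem.List.mem_insertBy _ _ _ _).mp ha with h1 | h1
      · subst h1; exact hx x' hx'
      · exact hcross a h1 x' (by simp [hx'])
    · exact hxs'

-- B's sort result lists the indices in strictly increasing (value, index) order
theorem pvOrder_pairwise (arr : List Int) : (pvOrder arr).Pairwise (pvLex arr) := by
  unfold pvOrder
  rw [PySem.List.sorted_eq_foldl_insertBy]
  exact pvFoldl_insertBy_pairwise arr _ [] (by simp) (by simp)
    (PySem.List.pairwise_lt_pyRange_one 0 _)

theorem pvOrder_perm (arr : List Int) :
    (pvOrder arr).Perm (PySem.List.pyRange 0 arr.length 1) :=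
  PySem.List.sorted_perm _ _ _

theorem pvOrder_len (arr : List Int) : (pvOrder arr).length = arr.length := by
  have h := (pvOrder_perm arr).length_eq
  rw [PySem.List.length_pyRange_one] at h
  omega

theorem pvOrder_nodup (arr : List Int) : (pvOrder arr).Nodup :=
  (pvOrder_perm arr).nodup_iff.mpr (PySem.List.nodup_pyRange_one 0 _)

theorem pvOrder_mem (arr : List Int) (j : Int) :
    j ∈ pvOrder arr ↔ 0 ≤ j ∧ j < arr.length := by
  rw [(pvOrder_perm arr).mem_iff, PySem.List.mem_pyRange_one]

theorem pvUpTo_succ (arr visited : List Int) (t : Nat) :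
    pvInnerUpTo arr visited ((t : Int) + 1) =
      (fun minIdx j =>
        let m1 := if PySem.List.pyGetD visited j 0 = 0 ∧ minIdx = -1 then j else minIdx
        if PySem.List.pyGetD visited j 0 = 0 ∧
            PySem.List.pyGetD arr j 0 < PySem.List.pyGetD arr m1 0 then j else m1)
        (pvInnerUpTo arr visited t) (t : Int) := by
  unfold pvInnerUpTo
  rw [PySem.List.pyRange_one_succ_right (by positivity), List.foldl_append]
  rfl

-- loop invariant of A's inner scan: the running minIdx is -1 while every index seen so far
-- is visited, and otherwise the (value, index)-least unvisited index seen so far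
theorem pvInner_fold (arr : List Int) (taken : List Int) (n : Nat) (t : Nat) (ht : t ≤ n)
    (hn : n = arr.length) :
    (pvInnerUpTo arr (pvVis n taken) t = -1 ∧ ∀ j : Int, 0 ≤ j → j < t → j ∈ taken) ∨
    (0 ≤ pvInnerUpTo arr (pvVis n taken) t ∧ pvInnerUpTo arr (pvVis n taken) t < t ∧
      pvInnerUpTo arr (pvVis n taken) t ∉ taken ∧
      ∀ j : Int, 0 ≤ j → j < t → j ∉ taken →
        ¬ pvLex arr j (pvInnerUpTo arr (pvVis n taken) t)) := by
  induction t with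
  | zero =>
    left
    constructor
    · unfold pvInnerUpTo
      rw [show PySem.List.pyRange 0 ((0:Nat):Int) 1 = [] from
        PySem.List.pyRange_one_eq_nil (by simp)]
      rfl
    · intro j h0 h1; omega
  | succ t ih =>
    have ih' := ih (by omega)
    rw [show (((t+1 : Nat)) : Int) = (t : Int) + 1 by push_cast; ring, pvUpTo_succ]
    set r := pvInnerUpTo arr (pvVis n taken) t with hr
    simp only []
    have hvt := pvVis_get n taken t (by positivity) (by omega)
    by_cases htk : (t : Int) ∈ taken
    · -- t already taken: state unchanged
      rw [hvt, if_pos htk]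
      have hne : ¬ ((1:Int) = 0 ∧ r = -1) := by omega
      rw [if_neg hne]
      have hne2 : ¬ ((1:Int) = 0 ∧ PySem.List.pyGetD arr (t:Int) 0 <
          PySem.List.pyGetD arr r 0) := by omega
      rw [if_neg hne2]
      rcases ih' with ⟨h1, h2⟩ | ⟨h1, h2, h3, h4⟩
      · left
        refine ⟨h1, fun j hj0 hj1 => ?_⟩
        by_cases hjt : j = t
        · subst hjt; exact htk
        · exact h2 j hj0 (by omega)
      · right
        refine ⟨h1, by omega, h3, fun j hj0 hj1 hj2 => ?_⟩
        by_cases hjt : j = t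
        · subst hjt; exact absurd htk hj2
        · exact h4 j hj0 (by omega) hj2
    · -- t unvisited
      rw [hvt, if_neg htk]
      rcases ih' with ⟨h1, h2⟩ | ⟨h1, h2, h3, h4⟩
      · -- no candidate so far: r = -1, the new minimum is t itself
        rw [if_pos (show (0:Int) = 0 ∧ r = -1 from ⟨rfl, h1⟩),
          if_neg (show ¬((0:Int) = 0 ∧ PySem.List.pyGetD arr (t:Int) 0 <
            PySem.List.pyGetD arr (t:Int) 0) by simp)]
        right
        refine ⟨by positivity, by omega, htk, fun j hj0 hj1 hj2 => ?_⟩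
        by_cases hjt : j = t
        · subst hjt; unfold pvLex; omega
        · exact absurd (h2 j hj0 (by omega)) hj2
      · -- r is already the minimum of the candidates below t
        have hrne : ¬ ((0:Int) = 0 ∧ r = -1) := by omega
        rw [if_neg hrne]
        by_cases hlt : PySem.List.pyGetD arr (t:Int) 0 < PySem.List.pyGetD arr r 0
        · rw [if_pos ⟨rfl, hlt⟩]
          right
          refine ⟨by positivity, by omega, htk, fun j hj0 hj1 hj2 => ?_⟩
          by_cases hjt : j = t
          · subst hjt; unfold pvLex; omega
          · have := h4 j hj0 (by omega) hj2
            unfold pvLex pvKey at *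
            omega
        · rw [if_neg (by omega)]
          right
          refine ⟨h1, by omega, h3, fun j hj0 hj1 hj2 => ?_⟩
          by_cases hjt : j = t
          · subst hjt
            unfold pvLex pvKey at *
            omega
          · exact h4 j hj0 (by omega) hj2

-- the selection step: with the first k indices of the sorted order visited, A's scan picks
-- exactly the next one, order[k]
theorem pvSelect (arr : List Int) (n k : Nat) (hn : n = arr.length) (hk : k < n) :
    pvInner arr (pvVis n ((pvOrder arr).take k)) (n : Int) = (pvOrder arr).getD k 0 := by
  have hlen : (pvOrder arr).length = n := by rw [pvOrder_len, hn]
  have hkl : k < (pvOrder arr).length := by omega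
  have hgd : (pvOrder arr).getD k 0 = (pvOrder arr)[k] := List.getD_eq_getElem _ _ hkl
  set o := (pvOrder arr)[k] with ho
  have homem : o ∈ pvOrder arr := List.getElem_mem hkl
  have hobnd := (pvOrder_mem arr o).mp homem
  have hont : o ∉ (pvOrder arr).take k := by
    intro hmem
    obtain ⟨i, hi, hieq⟩ := List.mem_take_iff_getElem.mp hmem
    have : i = k := ((pvOrder_nodup arr).getElem_inj_iff).mp hieq
    omega
  have hfold := pvInner_fold arr ((pvOrder arr).take k) n n (le_refl n) hn
  have hinner : pvInner arr (pvVis n ((pvOrder arr).take k)) (n : Int) =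
      pvInnerUpTo arr (pvVis n ((pvOrder arr).take k)) n := rfl
  rw [hinner, hgd]
  have hobnd2 : o < (n : Int) := by rw [hn]; exact hobnd.2
  rcases hfold with ⟨h1, h2⟩ | ⟨h1, h2, h3, h4⟩
  · exact absurd (h2 o hobnd.1 hobnd2) hont
  · set r := pvInnerUpTo arr (pvVis n ((pvOrder arr).take k)) n with hr
    by_cases hro : r = o
    · exact hro
    · exfalso
      -- r ∈ order, r ∉ take k, r ≠ o = order[k] → r appears after position k → pvLex o r,
      -- contradicting the minimality of r
      have hrmem : r ∈ pvOrder arr := (pvOrder_mem arr r).mpr ⟨h1, by omega⟩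
      obtain ⟨i, hi, hieq⟩ := List.getElem_of_mem hrmem
      have hik : k < i := by
        rcases Nat.lt_trichotomy i k with h | h | h
        · exfalso; apply h3; rw [← hieq]
          exact List.mem_take_iff_getElem.mpr ⟨i, by simp; omega, rfl⟩
        · exfalso; apply hro; rw [← hieq, ho]; subst h; rfl
        · exact h
      have hlex : pvLex arr o r := by
        have hpg := List.pairwise_iff_getElem.mp (pvOrder_pairwise arr)
        rw [← hieq]; exact hpg k i hkl hi hik
      exact h4 o hobnd.1 hobnd2 hont hlex

theorem pvFoldl_const {α β : Type} (g : α → α) (l : List β) (init : α) :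
    l.foldl (fun s _ => g s) init = g^[l.length] init := by
  induction l generalizing init with
  | nil => rfl
  | cons x xs ih => simp [List.foldl_cons, ih, Function.iterate_succ_apply]

-- marking the freshly selected index extends the visited indicator by one sorted position
theorem pvVis_update (arr : List Int) (n k : Nat) (hn : n = arr.length) (hk : k < n) :
    PySem.List.pySetD (pvVis n ((pvOrder arr).take k)) ((pvOrder arr).getD k 0) 1
      = pvVis n ((pvOrder arr).take (k + 1)) := by
  have hkl : k < (pvOrder arr).length := by rw [pvOrder_len]; omega
  have hgd : (pvOrder arr).getD k 0 = (pvOrder arr)[k] := List.getD_eq_getElem _ _ hkl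
  set o := (pvOrder arr)[k] with ho
  have hobnd : 0 ≤ o ∧ o < (arr.length : Int) := (pvOrder_mem arr o).mp (List.getElem_mem hkl)
  have htk : (pvOrder arr).take (k + 1) = (pvOrder arr).take k ++ [o] := by
    rw [List.take_add_one, List.getElem?_eq_getElem hkl]; rfl
  rw [hgd, PySem.List.pySetD_of_nonneg _ _ hobnd.1, htk]
  apply List.ext_getElem
  · simp [pvVis]
  · intro j hj1 hj2
    simp only [pvVis, List.length_set, List.length_map, List.length_range] at hj1 hj2 ⊢
    rw [List.getElem_set]
    have hgm : ∀ (t : List Int) (hjj : j < ((List.range n).map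
        (fun (i : Nat) => if (i : Int) ∈ t then (1 : Int) else 0)).length),
        ((List.range n).map (fun (i : Nat) => if (i : Int) ∈ t then (1 : Int) else 0))[j]
          = if (j : Int) ∈ t then 1 else 0 := by
      intro t hjj
      rw [List.getElem_map, List.getElem_range]
    rw [hgm, hgm]
    by_cases hje : j = o.toNat
    · simp [hje]
      exact fun _ => hobnd.1
    · have hne : (j : Int) ≠ o := by omega
      rw [if_neg (by omega)]
      simp [List.mem_append, hne]

-- outer loop invariant: after k selections the visited list marks the first k sorted
-- positions and minIdx is the k-th selected index
theorem pvOuter_inv (arr : List Int) (n : Nat) (hn : n = arr.length) :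
    ∀ (k : Nat), k ≤ n →
    (fun (st : List Int × Int) =>
        (PySem.List.pySetD st.1 (pvInner arr st.1 (n : Int)) 1,
          pvInner arr st.1 (n : Int)))^[k] (List.replicate n 0, -1) =
      (pvVis n ((pvOrder arr).take k),
        if k = 0 then -1 else (pvOrder arr).getD (k - 1) 0) := by
  intro k
  induction k with
  | zero =>
    intro _
    have h0 : pvVis n [] = List.replicate n 0 := by
      simp [pvVis]
    simp [h0]
  | succ k ih =>
    intro hk1
    rw [Function.iterate_succ_apply', ih (by omega)]
    simp only []
    rw [pvSelect arr n k hn (by omega), pvVis_update arr n k hn (by omega)]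
    simp

theorem pvGlue (arr : List Int) (hne : arr ≠ []) :
    getMedianIndex arr = getMedianIndex_alt arr := by
  set n := arr.length with hn
  have hn1 : 1 ≤ n := by
    cases arr with
    | nil => exact absurd rfl hne
    | cons x xs => simp [hn]
  set K : Nat := (n + 1) / 2 with hK
  have hK1 : 1 ≤ K := by omega
  have hKn : K ≤ n := by omega
  have hfd : PySem.Int.floordiv (n : Int) 2 = ((n / 2 : Nat) : Int) := by
    show Int.fdiv (n : Int) 2 = _
    rw [Int.fdiv_eq_ediv_of_nonneg _ (by norm_num)]
    omega
  have hfm : PySem.Int.mod (n : Int) 2 = ((n % 2 : Nat) : Int) := by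
    show Int.fmod (n : Int) 2 = _
    rw [Int.fmod_eq_emod_of_nonneg _ (by norm_num)]
    omega
  have hidxA : (if PySem.Int.mod (n : Int) 2 ≠ 0 then PySem.Int.floordiv (n : Int) 2 + 1
      else PySem.Int.floordiv (n : Int) 2) = (K : Int) := by
    rw [hfd, hfm]
    by_cases hpar : n % 2 = 0
    · rw [if_neg (by simp [hpar])]
      omega
    · rw [if_pos (by omega)]
      omega
  have hidxB : PySem.Int.floordiv ((n : Int) + 1) 2 = (K : Int) := by
    show Int.fdiv _ 2 = _
    rw [Int.fdiv_eq_ediv_of_nonneg _ (by norm_num)]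
    omega
  -- A's loop as an iterated selection step
  have hA : getMedianIndex arr =
      ((PySem.List.pyRange 0 (if PySem.Int.mod (n : Int) 2 ≠ 0 then
          PySem.Int.floordiv (n : Int) 2 + 1 else PySem.Int.floordiv (n : Int) 2) 1).foldl
        (fun (st : List Int × Int) _ =>
          (PySem.List.pySetD st.1 (pvInner arr st.1 (n : Int)) 1,
            pvInner arr st.1 (n : Int))) (List.replicate n 0, -1)).2 := rfl
  rw [hA, hidxA]
  have hfold := pvFoldl_const
    (fun (st : List Int × Int) =>
      (PySem.List.pySetD st.1 (pvInner arr st.1 (n : Int)) 1, pvInner arr st.1 (n : Int)))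
    (PySem.List.pyRange 0 (K : Int) 1) (List.replicate n 0, -1)
  rw [hfold, PySem.List.length_pyRange_one, show (((K : Int) - 0).toNat) = K by omega]
  rw [pvOuter_inv arr n hn K hKn]
  simp only [if_neg (by omega : ¬ K = 0)]
  -- B's lookup in the sorted order
  have hB : getMedianIndex_alt arr =
      PySem.List.pyGetD (pvOrder arr) (PySem.Int.floordiv ((n : Int) + 1) 2 - 1) 0 := rfl
  rw [hB, hidxB, show ((K : Int) - 1) = ((K - 1 : Nat) : Int) by omega,
    PySem.List.pyGetD_natCast]

-- ===== VERDICT (by name: the statement is the Claim_ definition above) =====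
theorem getMedianIndex_spec : Claim_equal_getMedianIndex := by
  intro arr _ hpre
  unfold Spec_getMedianIndex
  exact pvGlue arr hpre
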